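-- pv_equiv track=rewrite | github.com/junag/alive | automaton.py | eq_conds_unsat
-- ===== SOURCE A (Python) =====
-- def pos_above(p1, p2):
--   return p2[:len(p1)] == p1
--
-- def pos_sabove(p1, p2):
--   return pos_above(p1, p2) and not p1 == p2
--
-- def eq_conds_unsat(es):
--   us = []
--   for e in es:
--     insert_eq_cond(us, e)
--   for eqs in us:
--     if any(any(pos_sabove(p1, p2) for p1 in eqs) for p2 in eqs):
--       return True
--   return False
--
-- def insert_eq_cond(es, e):
--   ms = set()
--   js = []
--   for j, ps in enumerate(es):
--     if any(p in ps for p in e):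
--       ms |= ps
--       js.append(j)
--   for j in reversed(js):
--     del es[j]
--   ms |= e
--   es.append(frozenset(ms))
--   return es
-- ===== SOURCE B (Python) =====
-- def eq_conds_unsat(es):
--     # one dict: position -> component label; merge by relabelling, then
--     # sort each component once and check consecutive pairs for a strict prefix
--     comp = {}
--     for cid, e in enumerate(es):
--         old = {comp[p] for p in e if p in comp}
--         if old:
--             comp = {p: (cid if c in old else c) for p, c in comp.items()}
--         for p in e:
--             comp[p] = cid
--     groups = {}
--     for p, c in comp.items():
--         groups.setdefault(c, []).append(p)
--     for g in groups.values():
--         g.sort()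
--         for a, b in zip(g, g[1:]):
--             if b[:len(a)] == a:
--                 return True
--     return False
-- ===== Notes on version B (the rewrite author's own statement) =====
-- stated objective: faster
-- what changed: A rescans its whole list of merged frozensets for every condition and then runs an all-pairs strict-prefix test inside every component; B keeps one position-to-label dict (relabelling only when a merge actually happens), groups positions by label once, and sorts each component so one scan of consecutive pairs finds a strict-prefix pair.
import Mathlib
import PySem

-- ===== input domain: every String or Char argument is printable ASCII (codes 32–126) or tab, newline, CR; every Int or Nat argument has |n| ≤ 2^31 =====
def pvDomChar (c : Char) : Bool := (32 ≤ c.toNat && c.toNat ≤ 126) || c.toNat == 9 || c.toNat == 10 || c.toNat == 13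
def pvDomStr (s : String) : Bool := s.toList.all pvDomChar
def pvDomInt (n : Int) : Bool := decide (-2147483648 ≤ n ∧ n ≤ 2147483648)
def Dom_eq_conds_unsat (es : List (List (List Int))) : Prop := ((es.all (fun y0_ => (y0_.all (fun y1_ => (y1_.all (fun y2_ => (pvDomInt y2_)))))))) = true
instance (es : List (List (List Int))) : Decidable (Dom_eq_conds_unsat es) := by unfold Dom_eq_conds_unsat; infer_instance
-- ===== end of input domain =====

-- B replaces A's repeated merge-scan over growing frozensets and its per-group
-- all-pairs prefix test by one position→label dict (relabel on merge), then one
-- sort per component with a consecutive-pair strict-prefix check (objective: faster).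
-- Positions are Python tuples of ints (List Int here); each element of `es` is a
-- Python set of positions (a list of its distinct elements here).

-- ===== PORT A =====
-- pos_above(p1, p2): p2[:len(p1)] == p1 — the slice bound len(p1) is ≥ 0, so it is List.take (exact)
def pos_above (p1 p2 : List Int) : Bool := p2.take p1.length == p1

def pos_sabove (p1 p2 : List Int) : Bool := pos_above p1 p2 && !(p1 == p2)

-- `del es[j]` — every j comes from enumerate(es) and js is deleted back to front,
-- so the index is always in range and pop? is always `some` (the none arm is dead)
def pyDelIdx (l : List (PySem.Set (List Int))) (j : Int) : List (PySem.Set (List Int)) :=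
  match PySem.List.pop? l j with
  | some r => r.2
  | none => l

def insert_eq_cond (es : List (PySem.Set (List Int))) (e : List (List Int)) :
    List (PySem.Set (List Int)) :=
  let msjs := (PySem.List.enumerate es).foldl
    (fun (acc : PySem.Set (List Int) × List Int) jps =>
      if e.any (fun p => PySem.Set.contains jps.2 p) then
        (PySem.Set.union acc.1 jps.2, acc.2 ++ [jps.1])
      else acc)
    (PySem.Set.empty, [])
  let es' := msjs.2.reverse.foldl pyDelIdx es
  es' ++ [PySem.Set.union msjs.1 e]

def eq_conds_unsat (es : List (List (List Int))) : Bool :=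
  let us := es.foldl insert_eq_cond []
  us.any (fun eqs => eqs.any (fun p2 => eqs.any (fun p1 => pos_sabove p1 p2)))

-- ===== PORT B =====
-- transliteration of Source B: one dict comp : position → component label, labels are the
-- enumerate indices; a dict comprehension relabels merged components; then group by
-- label ({} + setdefault/append = modify), sort each group (g[1:] = tail), and check
-- consecutive pairs for a strict prefix (group elements are dict keys, hence distinct)
def eq_conds_unsat_alt (es : List (List (List Int))) : Bool :=
  let comp : PySem.Dict (List Int) Int :=
    (PySem.List.enumerate es).foldl
      (fun comp cide =>
        let old : PySem.Set Int := PySem.Set.ofList (cide.2.filterMap (fun p => comp.get? p))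
        let comp := if old.isEmpty then comp else
          PySem.Dict.mk (comp.items.map
            (fun pc => if old.contains pc.2 then (pc.1, cide.1) else pc))
        cide.2.foldl (fun c p => c.insert p cide.1) comp)
      PySem.Dict.empty
  let groups : PySem.Dict Int (List (List Int)) :=
    comp.items.foldl (fun g pc => g.modify pc.2 [] (fun l => l ++ [pc.1])) PySem.Dict.empty
  groups.values.any (fun g0 =>
    let g := PySem.List.sorted g0 (fun x => x)
    (g.zip g.tail).any (fun ab => ab.2.take ab.1.length == ab.1))

-- ===== PRECONDITION & SPEC =====
def Spec_eq_conds_unsat (es : List (List (List Int))) (out : Bool) : Prop := out = eq_conds_unsat_alt es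
instance (es : List (List (List Int))) (out : Bool) : Decidable (Spec_eq_conds_unsat es out) := by unfold Spec_eq_conds_unsat; infer_instance

-- ===== CLAIM (what is proved, stated in full; the proofs are below) =====
def Claim_equal_eq_conds_unsat : Prop := ∀ (es : List (List (List Int))), Dom_eq_conds_unsat es → Spec_eq_conds_unsat es (eq_conds_unsat es)

-- ===== LEMMAS AND PROOFS =====

-- `S intersects e` test used by A
def eCond (e : List (List Int)) (ps : PySem.Set (List Int)) : Bool :=
  e.any (fun p => PySem.Set.contains ps p)

-- the ms-accumulating fold of A, over the plain list
def mfold (e : List (List Int)) (us : List (PySem.Set (List Int)))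
    (m0 : PySem.Set (List Int)) : PySem.Set (List Int) :=
  us.foldl (fun m ps => if eCond e ps then PySem.Set.union m ps else m) m0

-- one step of B's first loop
def bstep (comp : PySem.Dict (List Int) Int) (cide : Int × List (List Int)) :
    PySem.Dict (List Int) Int :=
  let old : PySem.Set Int := PySem.Set.ofList (cide.2.filterMap (fun p => comp.get? p))
  let comp' := if old.isEmpty then comp else
    PySem.Dict.mk (comp.items.map
      (fun pc => if old.contains pc.2 then (pc.1, cide.1) else pc))
  cide.2.foldl (fun c p => c.insert p cide.1) comp'

-- "p and q lie in one group of us"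
def SameG (us : List (PySem.Set (List Int))) (p q : List Int) : Prop :=
  ∃ S ∈ us, p ∈ S ∧ q ∈ S

-- simulation invariant between A's list of groups and B's label dict
def InvPC (us : List (PySem.Set (List Int))) (comp : PySem.Dict (List Int) Int)
    (k : Int) : Prop :=
  (∀ p q, SameG us p q ↔ ∃ c, comp.get? p = some c ∧ comp.get? q = some c) ∧
  (∀ p c, comp.get? p = some c → c < k)


-- ---------- generic small facts ----------

theorem pv_eraseIdx_length_append {α : Type} (l : List α) (a : α) :
    (l ++ [a]).eraseIdx l.length = l := by
  induction l with
  | nil => rfl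
  | cons x xs ih => simpa [List.eraseIdx] using ih

theorem pv_pyDelIdx_eq (l : List (PySem.Set (List Int))) (j : Int) (h0 : 0 ≤ j)
    (h1 : j.toNat < l.length) : pyDelIdx l j = l.eraseIdx j.toNat := by
  have hj : ((j.toNat : Nat) : Int) = j := Int.toNat_of_nonneg h0
  have hp := PySem.List.pop?_natCast l j.toNat h1
  rw [hj] at hp
  rw [pyDelIdx, hp]

-- deleting sorted in-range indices back to front never touches an appended tail
theorem pv_delRev_append (js : List Int) (l : List (PySem.Set (List Int)))
    (a : PySem.Set (List Int))
    (hb : ∀ j ∈ js, 0 ≤ j ∧ j.toNat < l.length) (hs : js.Pairwise (· < ·)) :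
    js.reverse.foldl pyDelIdx (l ++ [a]) = js.reverse.foldl pyDelIdx l ++ [a] := by
  induction js using List.reverseRecOn generalizing l with
  | nil => simp
  | append_singleton js' j ih =>
    have hjb := hb j (by simp)
    have hlt : ∀ j' ∈ js', j' < j := by
      intro j' hj'
      have := (List.pairwise_append.mp hs).2.2 j' hj' j (by simp)
      exact this
    have hstep1 : pyDelIdx (l ++ [a]) j = l.eraseIdx j.toNat ++ [a] := by
      rw [pv_pyDelIdx_eq (l ++ [a]) j hjb.1 (by simp; omega),
        List.eraseIdx_append_of_lt_length hjb.2]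
    have hstep2 : pyDelIdx l j = l.eraseIdx j.toNat := pv_pyDelIdx_eq l j hjb.1 hjb.2
    have hb' : ∀ j' ∈ js', 0 ≤ j' ∧ j'.toNat < (l.eraseIdx j.toNat).length := by
      intro j' hj'
      have h1 := hb j' (by simp [hj'])
      have h2 := hlt j' hj'
      refine ⟨h1.1, ?_⟩
      rw [List.length_eraseIdx]
      simp [hjb.2]
      omega
    have hs' : js'.Pairwise (· < ·) := (List.pairwise_append.mp hs).1
    simp only [List.reverse_append, List.reverse_singleton, List.singleton_append,
      List.foldl_cons, hstep1, hstep2]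
    exact ih (l.eraseIdx j.toNat) hb' hs'

-- ---------- characterisation of A's insert_eq_cond ----------

def astep (e : List (List Int)) (acc : PySem.Set (List Int) × List Int)
    (jps : Int × PySem.Set (List Int)) : PySem.Set (List Int) × List Int :=
  if eCond e jps.2 then (PySem.Set.union acc.1 jps.2, acc.2 ++ [jps.1]) else acc

theorem pv_mfold_append (e : List (List Int)) (us : List (PySem.Set (List Int)))
    (ps : PySem.Set (List Int)) (m0 : PySem.Set (List Int)) :
    mfold e (us ++ [ps]) m0 =
      if eCond e ps then PySem.Set.union (mfold e us m0) ps else mfold e us m0 := by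
  simp [mfold, List.foldl_append]

theorem pv_Afold_char (e : List (List Int)) (us : List (PySem.Set (List Int))) :
    ((PySem.List.enumerate us).foldl (astep e) (PySem.Set.empty, [])).1
        = mfold e us PySem.Set.empty
    ∧ (∀ j ∈ ((PySem.List.enumerate us).foldl (astep e) (PySem.Set.empty, [])).2,
        0 ≤ j ∧ j.toNat < us.length)
    ∧ ((PySem.List.enumerate us).foldl (astep e) (PySem.Set.empty, [])).2.Pairwise (· < ·)
    ∧ ((PySem.List.enumerate us).foldl (astep e) (PySem.Set.empty, [])).2.reverse.foldl
        pyDelIdx us = us.filter (fun ps => !eCond e ps) := by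
  induction us using List.reverseRecOn with
  | nil => simp [mfold]
  | append_singleton l ps ih =>
    obtain ⟨ihm, ihb, ihs, ihd⟩ := ih
    have hen : PySem.List.enumerate [ps] ((0:Int) + l.length) = [((l.length : Int), ps)] := by
      simp [PySem.List.enumerate]
    rw [PySem.List.enumerate_append, List.foldl_append, hen, List.foldl_cons, List.foldl_nil]
    by_cases hc : eCond e ps
    · have hstep : astep e ((PySem.List.enumerate l).foldl (astep e) (PySem.Set.empty, []))
          ((l.length : Int), ps)
          = (PySem.Set.union ((PySem.List.enumerate l).foldl (astep e) (PySem.Set.empty, [])).1 ps,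
             ((PySem.List.enumerate l).foldl (astep e) (PySem.Set.empty, [])).2 ++ [(l.length : Int)]) := by
        simp only [astep]
        rw [if_pos hc]
      rw [hstep]
      refine ⟨?_, ?_, ?_, ?_⟩
      · rw [pv_mfold_append, if_pos hc, ihm]
      · intro j hj
        rcases List.mem_append.mp hj with hj | hj
        · obtain ⟨h1, h2⟩ := ihb j hj
          refine ⟨h1, ?_⟩
          rw [List.length_append]
          omega
        · rw [List.mem_singleton] at hj
          subst hj
          refine ⟨by positivity, ?_⟩
          rw [List.length_append]
          simp
      · rw [List.pairwise_append]
        refine ⟨ihs, by simp, ?_⟩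
        intro x hx b hb'
        rw [List.mem_singleton] at hb'
        subst hb'
        obtain ⟨h1, h2⟩ := ihb x hx
        omega
      · rw [List.reverse_append, List.reverse_singleton, List.singleton_append,
          List.foldl_cons]
        have h1 : pyDelIdx (l ++ [ps]) (l.length : Int) = l := by
          rw [pv_pyDelIdx_eq _ _ (by positivity) (by simp [Int.toNat_natCast])]
          simp only [Int.toNat_natCast]
          exact pv_eraseIdx_length_append l ps
        rw [h1, ihd, List.filter_append]
        simp [hc]
    · have hstep : astep e ((PySem.List.enumerate l).foldl (astep e) (PySem.Set.empty, []))
          ((l.length : Int), ps)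
          = (PySem.List.enumerate l).foldl (astep e) (PySem.Set.empty, []) := by
        simp only [astep]
        rw [if_neg hc]
      rw [hstep]
      refine ⟨?_, ?_, ?_, ?_⟩
      · rw [pv_mfold_append, if_neg hc, ihm]
      · intro j hj
        obtain ⟨h1, h2⟩ := ihb j hj
        refine ⟨h1, ?_⟩
        rw [List.length_append]
        omega
      · exact ihs
      · rw [pv_delRev_append _ _ _ ihb ihs, ihd, List.filter_append]
        simp [hc]

theorem pv_insert_eq_cond_char (us : List (PySem.Set (List Int))) (e : List (List Int)) :
    insert_eq_cond us e =
      us.filter (fun ps => !eCond e ps)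
        ++ [PySem.Set.union (mfold e us PySem.Set.empty) e] := by
  obtain ⟨hm, _, _, hd⟩ := pv_Afold_char e us
  show ((PySem.List.enumerate us).foldl (astep e) (PySem.Set.empty, [])).2.reverse.foldl
        pyDelIdx us
      ++ [PySem.Set.union ((PySem.List.enumerate us).foldl (astep e) (PySem.Set.empty, [])).1 e]
    = _
  rw [hd, hm]

-- ---------- membership facts ----------

theorem pv_eCond_iff (e : List (List Int)) (S : PySem.Set (List Int)) :
    eCond e S = true ↔ ∃ p ∈ e, p ∈ S := by
  simp [eCond, List.any_eq_true, PySem.Set.contains]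

theorem pv_mem_mfold (e : List (List Int)) (us : List (PySem.Set (List Int)))
    (m0 : PySem.Set (List Int)) (p : List Int) :
    p ∈ mfold e us m0 ↔ p ∈ m0 ∨ ∃ S ∈ us, eCond e S = true ∧ p ∈ S := by
  induction us generalizing m0 with
  | nil => simp [mfold]
  | cons S us ih =>
    simp only [mfold, List.foldl_cons] at *
    by_cases hc : eCond e S
    · rw [if_pos hc, ih]
      simp [PySem.Set.mem_union, hc]
      tauto
    · rw [if_neg hc, ih]
      simp [hc]

-- ---------- B's step: get? characterisation ----------

theorem pv_relabel_get? (l : List ((List Int) × Int)) (P : Int → Bool) (cid : Int)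
    (p : List Int) :
    (PySem.Dict.mk (l.map (fun pc => if P pc.2 then (pc.1, cid) else pc))).get? p
      = ((PySem.Dict.mk l).get? p).map (fun c => if P c then cid else c) := by
  induction l with
  | nil => simp [PySem.Dict.get?]
  | cons kv t ih =>
    obtain ⟨k, v⟩ := kv
    have harr : (if P v then (k, cid) else (k, v)) = (k, if P v then cid else v) := by
      by_cases h : P v <;> simp [h]
    simp only [List.map_cons, harr, PySem.Dict.get?_mk_cons]
    by_cases hk : k == p
    · simp [hk]
    · simp [hk, ih]

theorem pv_insertAll_get? (e : List (List Int)) (comp : PySem.Dict (List Int) Int)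
    (cid : Int) (q : List Int) :
    (e.foldl (fun c p => c.insert p cid) comp).get? q
      = if q ∈ e then some cid else comp.get? q := by
  induction e generalizing comp with
  | nil => simp
  | cons p rest ih =>
    simp only [List.foldl_cons, ih, PySem.Dict.get?_insert, List.mem_cons]
    by_cases h1 : q ∈ rest
    · simp [h1]
    · by_cases h2 : q = p <;> simp [h1, h2]

theorem pv_oldP_iff (comp : PySem.Dict (List Int) Int) (e : List (List Int)) (c : Int) :
    (PySem.Set.ofList (e.filterMap (fun p => comp.get? p))).contains c = true
      ↔ ∃ p ∈ e, comp.get? p = some c := by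
  simp [PySem.Set.contains, List.mem_filterMap]

theorem pv_bstep_get? (comp : PySem.Dict (List Int) Int) (cid : Int)
    (e : List (List Int)) (q : List Int) :
    (bstep comp (cid, e)).get? q =
      if q ∈ e then some cid
      else (comp.get? q).map
        (fun c => if (PySem.Set.ofList (e.filterMap (fun p => comp.get? p))).contains c
          then cid else c) := by
  unfold bstep
  rw [pv_insertAll_get?]
  by_cases h : q ∈ e
  · simp [h]
  · simp only [h, if_false]
    by_cases he : (PySem.Set.ofList (e.filterMap (fun p => comp.get? p))).isEmpty
    · rw [if_pos he]
      have hnil : (PySem.Set.ofList (e.filterMap (fun p => comp.get? p))) = [] := by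
        rwa [List.isEmpty_iff] at he
      cases hq : comp.get? q <;> simp [hnil]
    · rw [if_neg he]
      have := pv_relabel_get? comp.items
        (fun c => (PySem.Set.ofList (e.filterMap (fun p => comp.get? p))).contains c) cid q
      simpa using this

-- ---------- the simulation ----------

theorem pv_step_inv (us : List (PySem.Set (List Int))) (comp : PySem.Dict (List Int) Int)
    (k : Int) (e : List (List Int)) (h : InvPC us comp k) :
    InvPC (insert_eq_cond us e) (bstep comp (k, e)) (k + 1) := by
  obtain ⟨hsame, hfresh⟩ := h
  have hget := pv_bstep_get? comp k e
  have holdP := pv_oldP_iff comp e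
  -- labels of the new dict
  have hK1 : ∀ r, (bstep comp (k, e)).get? r = some k ↔
      r ∈ e ∨ ∃ S ∈ us, eCond e S = true ∧ r ∈ S := by
    intro r
    rw [hget r]
    by_cases hr : r ∈ e
    · simp [hr]
    · simp only [hr, if_false, false_or]
      constructor
      · intro hmap
        rcases Option.map_eq_some_iff.mp hmap with ⟨c, hc, hcv⟩
        by_cases hP : (PySem.Set.ofList (e.filterMap (fun p => comp.get? p))).contains c
        · rcases (holdP c).mp hP with ⟨t, ht, htc⟩
          have : SameG us r t := (hsame r t).mpr ⟨c, hc, htc⟩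
          rcases this with ⟨S, hS, hrS, htS⟩
          exact ⟨S, hS, (pv_eCond_iff e S).mpr ⟨t, ht, htS⟩, hrS⟩
        · rw [if_neg hP] at hcv
          have := hfresh r c hc
          omega
      · rintro ⟨S, hS, hcond, hrS⟩
        rcases (pv_eCond_iff e S).mp hcond with ⟨t, ht, htS⟩
        rcases (hsame r t).mp ⟨S, hS, hrS, htS⟩ with ⟨c, hc, htc⟩
        have hP : (PySem.Set.ofList (e.filterMap (fun p => comp.get? p))).contains c = true :=
          (holdP c).mpr ⟨t, ht, htc⟩
        rw [hc, Option.map_some, if_pos hP]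
  have hmerged : ∀ r, r ∈ PySem.Set.union (mfold e us PySem.Set.empty) e ↔
      r ∈ e ∨ ∃ S ∈ us, eCond e S = true ∧ r ∈ S := by
    intro r
    rw [PySem.Set.mem_union, pv_mem_mfold]
    constructor
    · rintro (h | h) 
      · rcases h with h | h
        · exact absurd h (by simp [PySem.Set.empty])
        · exact Or.inr h
      · exact Or.inl h
    · rintro (h | h)
      · exact Or.inr h
      · exact Or.inl (Or.inr h)
  constructor
  · -- same-group iff
    intro p q
    rw [pv_insert_eq_cond_char]
    constructor
    · rintro ⟨S, hS, hpS, hqS⟩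
      rcases List.mem_append.mp hS with hS | hS
      · -- untouched group
        obtain ⟨hSus, hScond⟩ := List.mem_filter.mp hS
        have hScond' : eCond e S = false := by simpa using hScond
        have hpe : p ∉ e := fun hpe =>
          absurd ((pv_eCond_iff e S).mpr ⟨p, hpe, hpS⟩) (by simp [hScond'])
        have hqe : q ∉ e := fun hqe =>
          absurd ((pv_eCond_iff e S).mpr ⟨q, hqe, hqS⟩) (by simp [hScond'])
        rcases (hsame p q).mp ⟨S, hSus, hpS, hqS⟩ with ⟨c, hcp, hcq⟩
        refine ⟨if (PySem.Set.ofList (e.filterMap (fun t => comp.get? t))).contains c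
          then k else c, ?_, ?_⟩
        · rw [hget p]; simp [hpe, hcp]
        · rw [hget q]; simp [hqe, hcq]
      · -- the merged group
        simp only [List.mem_singleton] at hS
        subst hS
        exact ⟨k, (hK1 p).mpr ((hmerged p).mp hpS), (hK1 q).mpr ((hmerged q).mp hqS)⟩
    · rintro ⟨c, hcp, hcq⟩
      by_cases hck : c = k
      · subst hck
        refine ⟨PySem.Set.union (mfold e us PySem.Set.empty) e, by simp, ?_, ?_⟩
        · exact (hmerged p).mpr ((hK1 p).mp hcp)
        · exact (hmerged q).mpr ((hK1 q).mp hcq)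
      · -- an untouched label
        have hdec : ∀ r, (bstep comp (k, e)).get? r = some c →
            r ∉ e ∧ comp.get? r = some c ∧
            (PySem.Set.ofList (e.filterMap (fun t => comp.get? t))).contains c = false := by
          intro r hr
          rw [hget r] at hr
          by_cases hre : r ∈ e
          · rw [if_pos hre] at hr
            have : k = c := Option.some_inj.mp hr
            exact absurd this.symm hck
          · simp only [hre, if_false] at hr
            rcases Option.map_eq_some_iff.mp hr with ⟨c0, hc0, hc0v⟩
            by_cases hP : (PySem.Set.ofList (e.filterMap (fun t => comp.get? t))).contains c0
            · rw [if_pos hP] at hc0v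
              exact absurd hc0v.symm hck
            · rw [if_neg hP] at hc0v
              subst hc0v
              exact ⟨hre, hc0, by simpa using hP⟩
        obtain ⟨hpe, hcp', hPc⟩ := hdec p hcp
        obtain ⟨hqe, hcq', _⟩ := hdec q hcq
        rcases (hsame p q).mpr ⟨c, hcp', hcq'⟩ with ⟨S, hS, hpS, hqS⟩
        have hScond : eCond e S = false := by
          by_contra hcond
          have hcond' : eCond e S = true := by simpa using hcond
          rcases (pv_eCond_iff e S).mp hcond' with ⟨t, ht, htS⟩
          rcases (hsame p t).mp ⟨S, hS, hpS, htS⟩ with ⟨c2, hc2p, hc2t⟩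
          have hc2c : c2 = c := by
            rw [hcp'] at hc2p
            exact (Option.some_inj.mp hc2p).symm
          subst hc2c
          have : (PySem.Set.ofList (e.filterMap (fun t => comp.get? t))).contains c2 = true :=
            (holdP c2).mpr ⟨t, ht, hc2t⟩
          rw [hPc] at this
          exact Bool.noConfusion this
        exact ⟨S, List.mem_append.mpr (Or.inl (List.mem_filter.mpr ⟨hS, by simp [hScond]⟩)),
          hpS, hqS⟩
  · -- freshness
    intro p c hc
    rw [hget p] at hc
    by_cases hpe : p ∈ e
    · simp [hpe] at hc; omega
    · simp only [hpe, if_false] at hc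
      rcases Option.map_eq_some_iff.mp hc with ⟨c0, hc0, hc0v⟩
      have := hfresh p c0 hc0
      by_cases hP : (PySem.Set.ofList (e.filterMap (fun t => comp.get? t))).contains c0
      · rw [if_pos hP] at hc0v; omega
      · rw [if_neg hP] at hc0v; omega

-- ---------- folding the simulation over all of es ----------

theorem pv_main_inv (es : List (List (List Int))) :
    ∀ (us : List (PySem.Set (List Int))) (comp : PySem.Dict (List Int) Int) (k : Int),
    InvPC us comp k →
    InvPC (es.foldl insert_eq_cond us) ((PySem.List.enumerate es k).foldl bstep comp)
      (k + es.length) := by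
  induction es with
  | nil => intro us comp k h; simpa using h
  | cons e es ih =>
    intro us comp k h
    rw [PySem.List.enumerate_cons, List.foldl_cons, List.foldl_cons]
    have harith : k + ((e :: es).length : Int) = (k + 1) + es.length := by
      simp [List.length_cons]
      ring
    rw [harith]
    exact ih (insert_eq_cond us e) (bstep comp (k, e)) (k + 1) (pv_step_inv us comp k e h)

-- ---------- A's final check ----------

theorem pv_pos_sabove_iff (p q : List Int) :
    pos_sabove p q = true ↔ p <+: q ∧ p ≠ q := by
  have h : pos_sabove p q = true ↔ q.take p.length = p ∧ ¬ p = q := by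
    simp [pos_sabove, pos_above]
  rw [h, List.prefix_iff_eq_take]
  constructor
  · rintro ⟨h1, h2⟩; exact ⟨h1.symm, h2⟩
  · rintro ⟨h1, h2⟩; exact ⟨h1.symm, h2⟩

theorem pv_A_iff (es : List (List (List Int))) :
    eq_conds_unsat es = true ↔
      ∃ p q, SameG (es.foldl insert_eq_cond []) p q ∧ p <+: q ∧ p ≠ q := by
  show (es.foldl insert_eq_cond []).any
      (fun eqs => eqs.any (fun p2 => eqs.any (fun p1 => pos_sabove p1 p2))) = true ↔ _
  rw [List.any_eq_true]
  constructor
  · rintro ⟨S, hS, h2⟩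
    rw [List.any_eq_true] at h2
    obtain ⟨p2, hp2, h1⟩ := h2
    rw [List.any_eq_true] at h1
    obtain ⟨p1, hp1, hps⟩ := h1
    obtain ⟨hpre, hne⟩ := (pv_pos_sabove_iff p1 p2).mp hps
    exact ⟨p1, p2, ⟨S, hS, hp1, hp2⟩, hpre, hne⟩
  · rintro ⟨p, q, ⟨S, hS, hpS, hqS⟩, hpre, hne⟩
    exact ⟨S, hS, List.any_eq_true.mpr ⟨q, hqS, List.any_eq_true.mpr ⟨p, hpS,
      (pv_pos_sabove_iff p q).mpr ⟨hpre, hne⟩⟩⟩⟩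

-- ---------- B's dict keys stay distinct ----------

theorem pv_keys_bstep (comp : PySem.Dict (List Int) Int) (cide : Int × List (List Int))
    (h : comp.keys.Nodup) : (bstep comp cide).keys.Nodup := by
  unfold bstep
  apply PySem.Dict.nodup_keys_foldl_insert cide.2 (fun _ _ => cide.1)
  have h1 : (PySem.Dict.mk (comp.items.map
      (fun pc => if (PySem.Set.ofList (cide.2.filterMap (fun p => comp.get? p))).contains pc.2
        then (pc.1, cide.1) else pc))).keys = comp.keys := by
    simp only [PySem.Dict.keys, List.map_map]
    apply List.map_congr_left
    intro pc _
    simp only [Function.comp_apply]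
    split <;> rfl
  by_cases he : (PySem.Set.ofList (cide.2.filterMap (fun p => comp.get? p))).isEmpty
  · rw [if_pos he]
    exact h
  · rw [if_neg he, h1]
    exact h

theorem pv_nodup_compF (l : List (Int × List (List Int))) :
    ∀ (comp : PySem.Dict (List Int) Int), comp.keys.Nodup →
    (l.foldl bstep comp).keys.Nodup := by
  induction l with
  | nil => intro comp h; exact h
  | cons x xs ih => intro comp h; exact ih (bstep comp x) (pv_keys_bstep comp x h)

-- ---------- grouping by label ----------

def glist (comp : PySem.Dict (List Int) Int) (c : Int) : List (List Int) :=
  (comp.items.filter (fun pc => pc.2 == c)).map (fun pc => pc.1)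

theorem pv_groups_getD (items : List ((List Int) × Int)) (c : Int) :
    (items.foldl (fun g pc => g.modify pc.2 [] (fun l => l ++ [pc.1]))
        (PySem.Dict.empty : PySem.Dict Int (List (List Int)))).getD c []
      = (items.filter (fun pc => pc.2 == c)).map (fun pc => pc.1) := by
  have hmap : items.foldl (fun g pc => g.modify pc.2 [] (fun l => l ++ [pc.1]))
      (PySem.Dict.empty : PySem.Dict Int (List (List Int)))
      = (items.map (fun pc => (pc.2, pc.1))).foldl
          (fun g p => g.modify p.1 [] (fun l => l ++ [p.2])) PySem.Dict.empty := by
    rw [List.foldl_map]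
  rw [hmap, PySem.Dict.getD_foldl_modify_append, PySem.Dict.getD_empty, List.nil_append,
    List.filter_map, List.map_map]
  rfl

theorem pv_groups_keys (items : List ((List Int) × Int)) :
    (items.foldl (fun g pc => g.modify pc.2 [] (fun l => l ++ [pc.1]))
        (PySem.Dict.empty : PySem.Dict Int (List (List Int)))).keys
      = PySem.Set.ofList (items.map (fun pc => pc.2)) := by
  rw [PySem.Dict.keys_foldl_modify_key items (fun pc => pc.2) []
    (fun _ pc => (fun l => l ++ [pc.1])), PySem.Dict.keys_empty, PySem.Set.update_nil_left]

theorem pv_mem_glist (comp : PySem.Dict (List Int) Int) (hn : comp.keys.Nodup)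
    (c : Int) (p : List Int) :
    p ∈ glist comp c ↔ comp.get? p = some c := by
  unfold glist
  rw [PySem.Dict.get?_eq_some_iff_mem_items comp p c hn]
  constructor
  · intro h
    rcases List.mem_map.mp h with ⟨pc, hpc, hpc1⟩
    obtain ⟨hmem, hc⟩ := List.mem_filter.mp hpc
    have : pc = (p, c) := by
      obtain ⟨x, y⟩ := pc
      simp only at hpc1
      simp only [beq_iff_eq] at hc
      simp [hpc1, hc]
    rw [this] at hmem
    exact hmem
  · intro h
    exact List.mem_map.mpr ⟨(p, c), List.mem_filter.mpr ⟨h, by simp⟩, rfl⟩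

theorem pv_glist_nodup (comp : PySem.Dict (List Int) Int) (hn : comp.keys.Nodup)
    (c : Int) : (glist comp c).Nodup := by
  have hkeys : comp.keys = comp.items.map (fun pc => pc.1) := rfl
  rw [hkeys] at hn
  unfold glist
  exact hn.sublist (List.Sublist.map (fun pc : (List Int) × Int => pc.1) List.filter_sublist)

-- ---------- the sorted consecutive-pair check ----------

def adjAny (g : List (List Int)) : Bool :=
  let s := PySem.List.sorted g (fun x => x)
  (s.zip s.tail).any (fun ab => ab.2.take ab.1.length == ab.1)

theorem pv_lt_of_prefix (p : List Int) : ∀ (q : List Int), p <+: q → p ≠ q → p < q := by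
  induction p with
  | nil =>
    intro q _ hne
    cases q with
    | nil => exact absurd rfl hne
    | cons b t => exact List.nil_lt_cons b t
  | cons a p' ih =>
    intro q hpre hne
    cases q with
    | nil => simp at hpre
    | cons b q' =>
      obtain ⟨hab, hpre'⟩ := List.cons_prefix_cons.mp hpre
      subst hab
      have hne' : p' ≠ q' := fun h => hne (by rw [h])
      exact List.cons_lt_cons_iff.mpr (Or.inr ⟨rfl, ih q' hpre' hne'⟩)

theorem pv_prefix_between (p : List Int) :
    ∀ (q r : List Int), p <+: q → p < r → r < q → p <+: r := by
  induction p with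
  | nil => intro q r _ _ _; exact List.nil_prefix
  | cons a p' ih =>
    intro q r hpre hpr hrq
    cases q with
    | nil => simp at hpre
    | cons b q' =>
      obtain ⟨hab, hpq'⟩ := List.cons_prefix_cons.mp hpre
      subst hab
      cases r with
      | nil => exact absurd hpr (List.not_lt_nil _)
      | cons c r' =>
        rcases List.cons_lt_cons_iff.mp hpr with h1 | ⟨h1, h2⟩
        · rcases List.cons_lt_cons_iff.mp hrq with h3 | ⟨h3, h4⟩
          · exact absurd h3 (by omega)
          · omega
        · subst h1
          rcases List.cons_lt_cons_iff.mp hrq with h3 | ⟨h3, h4⟩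
          · exact absurd h3 (lt_irrefl a)
          · exact List.cons_prefix_cons.mpr ⟨rfl, ih q' r' hpq' h2 h4⟩

theorem pv_sorted_instEq (g : List (List Int)) (d1 d2 : DecidableLT (List Int)) :
    @PySem.List.sorted (List Int) (List Int) List.instLT d1 g (fun x => x) false
      = @PySem.List.sorted (List Int) (List Int) List.instLT d2 g (fun x => x) false := by
  have h : d1 = d2 := funext fun a => funext fun b => Subsingleton.elim _ _
  rw [h]

theorem pv_adjAny_iff (g : List (List Int)) (hg : g.Nodup) :
    adjAny g = true ↔ ∃ p ∈ g, ∃ q ∈ g, p <+: q ∧ p ≠ q := by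
  unfold adjAny
  have hperm : (PySem.List.sorted g (fun x => x)).Perm g :=
    PySem.List.sorted_perm g (fun x => x) false
  have hnd : (PySem.List.sorted g (fun x => x)).Nodup := hperm.nodup_iff.mpr hg
  have hpair : (PySem.List.sorted g (fun x => x)).Pairwise (fun a b => a ≤ b) := by
    have h := PySem.List.sorted_pairwise (κ := List Int) g (fun x => x)
    convert h using 1
    exact pv_sorted_instEq g _ _
  have hmono : ∀ (i j : Nat) (hi : i < (PySem.List.sorted g (fun x => x)).length)
      (hj : j < (PySem.List.sorted g (fun x => x)).length), i < j →
      (PySem.List.sorted g (fun x => x))[i] ≤ (PySem.List.sorted g (fun x => x))[j] := by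
    intro i j hi hj hij
    exact List.pairwise_iff_getElem.mp hpair i j hi hj hij
  rw [List.any_eq_true]
  constructor
  · rintro ⟨ab, hab, hpred⟩
    rcases List.mem_iff_getElem.mp hab with ⟨i, hilen, hi⟩
    have hi1 : i < (PySem.List.sorted g (fun x => x)).length - 1 := by
      rw [List.length_zip, List.length_tail] at hilen
      omega
    have hilt : i < (PySem.List.sorted g (fun x => x)).length := by omega
    have hi1lt : i + 1 < (PySem.List.sorted g (fun x => x)).length := by omega
    have habv : ab = ((PySem.List.sorted g (fun x => x))[i],
        (PySem.List.sorted g (fun x => x))[i+1]) := by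
      rw [← hi, List.getElem_zip]
      congr 1
      exact List.getElem_tail _
    set s := PySem.List.sorted g (fun x => x)
    have hle : s[i] ≤ s[i+1] := hmono i (i+1) hilt hi1lt (by omega)
    have hne : s[i] ≠ s[i+1] := by
      intro h
      have := (hnd.getElem_inj_iff).mp h
      omega
    rw [habv] at hpred
    simp only [beq_iff_eq] at hpred
    have hpre : s[i] <+: s[i+1] := by
      rw [List.prefix_iff_eq_take]
      exact hpred.symm
    exact ⟨s[i], hperm.mem_iff.mp (List.getElem_mem hilt),
      s[i+1], hperm.mem_iff.mp (List.getElem_mem hi1lt), hpre, hne⟩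
  · rintro ⟨p, hp, q, hq, hpre, hne⟩
    set s := PySem.List.sorted g (fun x => x) with hs
    have hps : p ∈ s := hperm.mem_iff.mpr hp
    have hqs : q ∈ s := hperm.mem_iff.mpr hq
    rcases List.mem_iff_getElem.mp hps with ⟨ip, hip, hgp⟩
    rcases List.mem_iff_getElem.mp hqs with ⟨iq, hiq, hgq⟩
    have hpq : p < q := pv_lt_of_prefix p q hpre hne
    have hij : ip < iq := by
      rcases Nat.lt_trichotomy ip iq with h | h | h
      · exact h
      · subst h
        exact absurd (hgp.symm.trans hgq) hne
      · have := hmono iq ip hiq hip h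
        rw [hgp, hgq] at this
        exact absurd hpq (not_lt_of_ge this)
    have hip1 : ip + 1 < s.length := by omega
    have hltr : p < s[ip+1] := by
      have hle := hmono ip (ip+1) hip hip1 (by omega)
      have hner : s[ip] ≠ s[ip+1] := by
        intro h
        have := (hnd.getElem_inj_iff).mp h
        omega
      rw [hgp] at hle hner
      exact lt_of_le_of_ne hle hner
    have hrq : s[ip+1] ≤ q := by
      rcases Nat.lt_or_ge (ip+1) iq with h | h
      · have := hmono (ip+1) iq hip1 hiq h
        rw [hgq] at this
        exact this
      · have hiq' : iq = ip + 1 := by omega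
        subst hiq'
        exact le_of_eq hgq
    have hprer : p <+: s[ip+1] := by
      rcases lt_or_eq_of_le hrq with h | h
      · exact pv_prefix_between p q s[ip+1] hpre hltr h
      · rw [h]; exact hpre
    refine ⟨(s[ip], s[ip+1]), ?_, ?_⟩
    · rw [List.mem_iff_getElem]
      refine ⟨ip, ?_, ?_⟩
      · rw [List.length_zip, List.length_tail]; omega
      · rw [List.getElem_zip]
        congr 1
        exact List.getElem_tail _
    · simp only [beq_iff_eq]
      rw [hgp]
      exact (List.prefix_iff_eq_take.mp hprer).symm

-- ---------- B's final check ----------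

def compF (es : List (List (List Int))) : PySem.Dict (List Int) Int :=
  (PySem.List.enumerate es).foldl bstep PySem.Dict.empty

theorem pv_B_iff (es : List (List (List Int))) :
    eq_conds_unsat_alt es = true ↔
      ∃ p q, (∃ c, (compF es).get? p = some c ∧ (compF es).get? q = some c)
        ∧ p <+: q ∧ p ≠ q := by
  have hn : (compF es).keys.Nodup := by
    apply pv_nodup_compF
    simp [PySem.Dict.keys_empty]
  have hport : eq_conds_unsat_alt es =
      ((compF es).items.foldl (fun g pc => g.modify pc.2 [] (fun l => l ++ [pc.1]))
        (PySem.Dict.empty : PySem.Dict Int (List (List Int)))).values.any adjAny := rfl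
  rw [hport]
  have hgkeys := pv_groups_keys (compF es).items
  have hgnodup : ((compF es).items.foldl
      (fun g pc => g.modify pc.2 [] (fun l => l ++ [pc.1]))
      (PySem.Dict.empty : PySem.Dict Int (List (List Int)))).keys.Nodup := by
    apply PySem.Dict.nodup_keys_foldl_modify_key (compF es).items (fun pc => pc.2) []
      (fun _ pc => (fun l => l ++ [pc.1]))
    simp [PySem.Dict.keys_empty]
  rw [PySem.Dict.values_eq_map_keys _ hgnodup [], List.any_map, hgkeys]
  rw [List.any_eq_true]
  constructor
  · rintro ⟨c, hcmem, hadj⟩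
    simp only [Function.comp] at hadj
    rw [pv_groups_getD] at hadj
    have hadj' : adjAny (glist (compF es) c) = true := hadj
    rcases (pv_adjAny_iff _ (pv_glist_nodup _ hn c)).mp hadj' with ⟨p, hp, q, hq, hpre, hne⟩
    exact ⟨p, q, ⟨c, (pv_mem_glist _ hn c p).mp hp, (pv_mem_glist _ hn c q).mp hq⟩, hpre, hne⟩
  · rintro ⟨p, q, ⟨c, hp, hq⟩, hpre, hne⟩
    refine ⟨c, ?_, ?_⟩
    · rw [PySem.Set.mem_ofList, List.mem_map]
      exact ⟨(p, c), PySem.Dict.mem_items_of_get?_eq_some _ hp, rfl⟩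
    · simp only [Function.comp]
      rw [pv_groups_getD]
      have : adjAny (glist (compF es) c) = true :=
        (pv_adjAny_iff _ (pv_glist_nodup _ hn c)).mpr
          ⟨p, (pv_mem_glist _ hn c p).mpr hp, q, (pv_mem_glist _ hn c q).mpr hq, hpre, hne⟩
      exact this

-- ===== VERDICT (by name: the statement is the Claim_ definition above) =====
theorem eq_conds_unsat_spec : Claim_equal_eq_conds_unsat := by
  intro es _
  unfold Spec_eq_conds_unsat
  have hbase : InvPC [] PySem.Dict.empty 0 := by
    constructor
    · intro p q
      simp [SameG, PySem.Dict.get?_empty]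
    · intro p c hc
      rw [PySem.Dict.get?_empty] at hc
      exact absurd hc (by simp)
  obtain ⟨hsame, _⟩ := pv_main_inv es [] PySem.Dict.empty 0 hbase
  rw [Bool.eq_iff_iff, pv_A_iff, pv_B_iff]
  constructor
  · rintro ⟨p, q, hsg, hpre, hne⟩
    exact ⟨p, q, (hsame p q).mp hsg, hpre, hne⟩
  · rintro ⟨p, q, hc, hpre, hne⟩
    exact ⟨p, q, (hsame p q).mpr hc, hpre, hne⟩
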